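-- pv_equiv track=rewrite | github.com/acybppres/Lothar | Collatz/kenglish/mrlattice.py | generationAffineParamsFromPath
-- ===== SOURCE A (Python) =====
-- def countZeros(label):
--     zero_count = 0
--     for bit in label:
--         if bit == "0":
--             zero_count += 1
--     return zero_count
--
-- def generationAffineParamsFromPath(label):
--     """
--     Generate the Affine Parameters for Ax + B that converts any label in the lattice to
--     the power of 2 of its generation.
--
--     e.g.  5 -> "0111" -> A=3,B=1 -> 3*5 + 1 -> 2**4
--     """
--     a, b = len(label), countZeros(label)
--     A = 3**(b)
--     d = b - 1
--     B = 0
--     for c in range(a):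
--         if label[c] == "0":
--             B += (2**c)*(3**d)
--             d -= 1
--     return A, B
-- ===== SOURCE B (Python) =====
-- def generationAffineParamsFromPath(label):
--     """
--     Generate the Affine Parameters for Ax + B that converts any label in the lattice to
--     the power of 2 of its generation.  Single Horner-style pass: A, B and the running
--     power of two are maintained incrementally, with no separate zero-count pass.
--     """
--     A, B, pow2 = 1, 0, 1
--     for ch in label:
--         if ch == "0":
--             A *= 3
--             B = B * 3 + pow2
--         pow2 *= 2
--     return A, B
-- ===== Notes on version B (the rewrite author's own statement) =====
-- stated objective: alternative
-- what changed: Replaced the two-pass scheme (separate countZeros pass, then a loop computing each term as 2**c * 3**d) by a single Horner-style pass maintaining A, B and a running power of two incrementally; trades per-term pow calls for per-step bigint multiplications.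
import Mathlib
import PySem

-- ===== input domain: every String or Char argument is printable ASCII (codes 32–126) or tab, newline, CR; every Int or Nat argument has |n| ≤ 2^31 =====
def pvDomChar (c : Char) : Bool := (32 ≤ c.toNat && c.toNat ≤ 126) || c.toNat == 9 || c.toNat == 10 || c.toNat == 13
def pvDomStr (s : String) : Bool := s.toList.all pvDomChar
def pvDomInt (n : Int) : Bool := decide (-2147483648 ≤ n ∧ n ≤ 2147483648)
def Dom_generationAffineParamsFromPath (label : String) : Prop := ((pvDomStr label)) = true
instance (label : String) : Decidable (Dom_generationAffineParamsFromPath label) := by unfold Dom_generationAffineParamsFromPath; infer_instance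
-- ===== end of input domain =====

-- B replaces A's two passes (countZeros, then per-term 2**c * 3**d terms) by a single
-- Horner-style pass maintaining A, B and a running power of two incrementally (alternative, not faster).


-- ===== PORT A =====
def countZeros (label : String) : Int :=
  label.toList.foldl (fun zero_count bit => if bit = '0' then zero_count + 1 else zero_count) 0

def generationAffineParamsFromPath (label : String) : Int × Int :=
  let a : Int := PySem.Str.len label
  let b : Int := countZeros label
  let A : Int := 3 ^ b.toNat
  let st := (PySem.List.pyRange 0 a 1).foldl
      (fun (st : Int × Int) c =>
        if PySem.List.pyGetD label.toList c ' ' = '0' then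
          (st.1 + 2 ^ c.toNat * 3 ^ st.2.toNat, st.2 - 1)
        else st)
      (0, b - 1)
  (A, st.1)

-- ===== PORT B =====
def generationAffineParamsFromPath_alt (label : String) : Int × Int :=
  let st := label.toList.foldl
      (fun (st : Int × Int × Int) ch =>
        let st' := if ch = '0' then (st.1 * 3, st.2.1 * 3 + st.2.2, st.2.2) else st
        (st'.1, st'.2.1, st'.2.2 * 2))
      (1, 0, 1)
  (st.1, st.2.1)

-- ===== PRECONDITION & SPEC =====
def Spec_generationAffineParamsFromPath (label : String) (out : Int × Int) : Prop := out = generationAffineParamsFromPath_alt label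
instance (label : String) (out : Int × Int) : Decidable (Spec_generationAffineParamsFromPath label out) := by unfold Spec_generationAffineParamsFromPath; infer_instance

-- ===== CLAIM (what is proved, stated in full; the proofs are below) =====
def Claim_equal_generationAffineParamsFromPath : Prop := ∀ (label : String), Dom_generationAffineParamsFromPath label → Spec_generationAffineParamsFromPath label (generationAffineParamsFromPath label)

-- ===== LEMMAS AND PROOFS =====

-- number of '0' characters
def czP (l : List Char) : Nat := l.countP (fun c => c == '0')

-- B's Horner sum
def gH : List Char → Int
  | [] => 0
  | ch :: t => if ch = '0' then 3 ^ czP t + 2 * gH t else 2 * gH t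

-- A's sum with an explicit decreasing exponent d
def aH : List Char → Int → Int
  | [], _ => 0
  | ch :: t, d => if ch = '0' then 3 ^ d.toNat + 2 * aH t (d - 1) else 2 * aH t d

theorem czP_cons (ch : Char) (t : List Char) :
    czP (ch :: t) = (if ch = '0' then 1 else 0) + czP t := by
  simp [czP, List.countP_cons, beq_iff_eq]
  split_ifs <;> omega

theorem enum_elim (α : Type) (L : List α) : ∀ (s : Int) (p : Int × α), p ∈ PySem.List.enumerate L s →
    ∃ k : Nat, k < L.length ∧ p.1 = s + k ∧ L[k]? = some p.2 := by
  induction L with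
  | nil => intro s p h; simp [PySem.List.enumerate] at h
  | cons x xs ih =>
    intro s p h
    rw [PySem.List.enumerate_cons] at h
    rcases List.mem_cons.mp h with h | h
    · exact ⟨0, by simp, by simp [h], by simp [h]⟩
    · obtain ⟨k, hk, h1, h2⟩ := ih (s + 1) p h
      exact ⟨k + 1, by simpa using hk, by omega, by simpa using h2⟩

-- A's index loop over range(len(L)) reading L[c] = the loop over enumerate(L)
theorem fold_range_enum (L : List Char) (f : (Int × Int) → Int → Char → (Int × Int))
    (init : Int × Int) :
    (PySem.List.pyRange 0 (L.length : Int) 1).foldl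
        (fun st c => f st c (PySem.List.pyGetD L c ' ')) init
      = (PySem.List.enumerate L 0).foldl (fun st p => f st p.1 p.2) init := by
  have h : PySem.List.pyRange 0 (L.length : Int) 1
      = (PySem.List.enumerate L 0).map (fun p => p.1) := by
    simpa using (PySem.List.map_fst_enumerate L 0).symm
  rw [h, List.foldl_map]
  apply PySem.List.foldl_congr_mem
  intro acc p hp
  obtain ⟨k, hk, h1, h2⟩ := enum_elim _ L 0 p hp
  have h2' : L[k] = p.2 := by
    have := List.getElem?_eq_getElem (l := L) (i := k) hk
    rw [this] at h2
    exact Option.some.inj h2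
  have hget : PySem.List.pyGetD L p.1 ' ' = p.2 := by
    have h1' : p.1 = (k : Int) := by omega
    rw [h1', PySem.List.pyGetD_eq_getElem L ' ' (by positivity) (by exact_mod_cast hk)]
    simpa using h2'
  rw [hget]

-- characterization of A's loop
theorem aFold (l : List Char) : ∀ (s : Nat) (B0 d0 : Int),
    (PySem.List.enumerate l (s : Int)).foldl
        (fun (st : Int × Int) p =>
          if p.2 = '0' then (st.1 + 2 ^ p.1.toNat * 3 ^ st.2.toNat, st.2 - 1) else st)
        (B0, d0)
      = (B0 + 2 ^ s * aH l d0, d0 - czP l) := by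
  induction l with
  | nil => intro s B0 d0; simp [PySem.List.enumerate, aH, czP]
  | cons ch t ih =>
    intro s B0 d0
    have hs1 : (s : Int) + 1 = ((s + 1 : Nat) : Int) := by push_cast; ring
    rw [PySem.List.enumerate_cons, List.foldl_cons]
    simp only [Int.toNat_natCast, hs1]
    by_cases h : ch = '0'
    · rw [if_pos h, ih (s + 1) (B0 + 2 ^ s * 3 ^ d0.toNat) (d0 - 1)]
      rw [aH, czP_cons, if_pos h, if_pos h]
      refine Prod.ext ?_ ?_
      · simp [pow_succ]; ring
      · simp; omega
    · rw [if_neg h, ih (s + 1) B0 d0]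
      rw [aH, czP_cons, if_neg h, if_neg h]
      refine Prod.ext ?_ ?_
      · simp [pow_succ]; ring
      · simp

-- characterization of B's loop
theorem bFold (l : List Char) : ∀ (A0 B0 p0 : Int),
    l.foldl
        (fun (st : Int × Int × Int) ch =>
          let st' := if ch = '0' then (st.1 * 3, st.2.1 * 3 + st.2.2, st.2.2) else st
          (st'.1, st'.2.1, st'.2.2 * 2))
        (A0, B0, p0)
      = (A0 * 3 ^ czP l, B0 * 3 ^ czP l + p0 * gH l, p0 * 2 ^ l.length) := by
  induction l with
  | nil => intro A0 B0 p0; simp [czP, gH]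
  | cons ch t ih =>
    intro A0 B0 p0
    by_cases h : ch = '0'
    · simp only [List.foldl_cons, h]
      rw [ih]
      rw [czP_cons, gH]
      simp [pow_succ, pow_add]
      refine ⟨by ring, by ring, by ring⟩
    · simp only [List.foldl_cons, if_neg h]
      rw [ih]
      rw [czP_cons, gH]
      simp [h, pow_succ]
      refine ⟨by ring, by ring⟩

-- the two sums agree when A starts its exponent at (#zeros - 1)
theorem aH_eq_gH (l : List Char) : aH l ((czP l : Int) - 1) = gH l := by
  induction l with
  | nil => simp [aH, gH]
  | cons ch t ih =>
    rw [czP_cons]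
    by_cases h : ch = '0'
    · rw [if_pos h]
      have e : ((1 + czP t : Nat) : Int) - 1 = (czP t : Int) := by push_cast; ring
      rw [e, aH, gH, if_pos h, if_pos h]
      simp [ih]
    · rw [if_neg h]
      have e : ((0 + czP t : Nat) : Int) - 1 = (czP t : Int) - 1 := by push_cast; ring
      rw [e, aH, gH, if_neg h, if_neg h, ih]

theorem aFold0 (l : List Char) (B0 d0 : Int) :
    (PySem.List.enumerate l 0).foldl
        (fun (st : Int × Int) p =>
          if p.2 = '0' then (st.1 + 2 ^ p.1.toNat * 3 ^ st.2.toNat, st.2 - 1) else st)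
        (B0, d0)
      = (B0 + aH l d0, d0 - czP l) := by
  have h := aFold l 0 B0 d0
  simpa using h

theorem countZeros_eq (label : String) : countZeros label = (czP label.toList : Nat) := by
  unfold countZeros czP
  have := PySem.List.foldl_count_if (fun c => c == '0') label.toList 0
  simpa [beq_iff_eq] using this

-- ===== VERDICT (by name: the statement is the Claim_ definition above) =====
theorem generationAffineParamsFromPath_spec : Claim_equal_generationAffineParamsFromPath := by
  intro label _
  unfold Spec_generationAffineParamsFromPath
  show generationAffineParamsFromPath label = generationAffineParamsFromPath_alt label
  rw [generationAffineParamsFromPath, generationAffineParamsFromPath_alt]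
  rw [PySem.Str.len_eq, countZeros_eq]
  rw [fold_range_enum label.toList
      (fun st c ch => if ch = '0' then (st.1 + 2 ^ c.toNat * 3 ^ st.2.toNat, st.2 - 1) else st)]
  rw [aFold0 label.toList 0 ((czP label.toList : Int) - 1)]
  rw [bFold label.toList 1 0 1]
  simp [aH_eq_gH]
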